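-- pv_equiv track=rewrite | github.com/elieeshoa/RL | ETC-Thompson/code/u.py | solution
-- ===== SOURCE A (Python) =====
-- def solution(a):
--     count = 0
--     for i in range(len(a)):
--         for j in range(i + 1, len(a)):
--             if len(str(a[i])) == len(str(a[j])):
--                 if str(a[i]) in str(a[j]) * 2:
--                     count += 1
--     return count
-- ===== SOURCE B (Python) =====
-- def _canon(s):
--     # smallest rotation of s (canonical representative of its rotation class)
--     rots = [s[i:] + s[:i] for i in range(len(s))]
--     return min(rots) if rots else s
--
--
-- def solution(a):
--     count = 0
--     seen = {}
--     for x in a: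
--         k = _canon(str(x))
--         c = seen.get(k, 0)
--         count += c
--         seen[k] = c + 1
--     return count
-- ===== Notes on version B (the rewrite author's own statement) =====
-- stated objective: faster
-- what changed: Replaces the all-pairs rotation test with a single pass that canonicalises each str(x) to its minimal rotation and counts pairs via a running hash-map counter.
import Mathlib
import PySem

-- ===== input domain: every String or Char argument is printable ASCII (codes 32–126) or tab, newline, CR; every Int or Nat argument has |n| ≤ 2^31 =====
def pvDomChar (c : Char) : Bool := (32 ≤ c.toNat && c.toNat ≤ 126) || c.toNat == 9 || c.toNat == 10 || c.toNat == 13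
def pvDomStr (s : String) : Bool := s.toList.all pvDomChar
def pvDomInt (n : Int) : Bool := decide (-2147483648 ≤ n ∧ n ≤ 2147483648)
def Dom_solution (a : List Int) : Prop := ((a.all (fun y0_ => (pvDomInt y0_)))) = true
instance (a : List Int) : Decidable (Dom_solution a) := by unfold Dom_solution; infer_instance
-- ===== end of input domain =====

-- B replaces A's all-pairs rotation test by one pass over the list: each str(x) is
-- canonicalised to its minimal rotation and pairs are counted with a running counter map.

-- ===== PORT A =====
-- literal transliteration of A's nested index loops ('str(a[j]) * 2' ported as the doubled list of chars)
def solution (a : List Int) : Int :=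
  (PySem.List.pyRange 0 (a.length : Int) 1).foldl (fun count i =>
    (PySem.List.pyRange (i + 1) (a.length : Int) 1).foldl (fun count j =>
      if (PySem.Int.toChars (PySem.List.pyGetD a i 0)).length
          = (PySem.Int.toChars (PySem.List.pyGetD a j 0)).length then
        if PySem.Chars.isIn (PySem.Int.toChars (PySem.List.pyGetD a i 0))
            (PySem.Int.toChars (PySem.List.pyGetD a j 0) ++ PySem.Int.toChars (PySem.List.pyGetD a j 0)) = true then
          count + 1
        else count
      else count) count) 0

-- ===== PORT B =====
-- _canon from Source B: the minimal rotation of s (min over the list of all rotations)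
def canonRot (s : List Char) : List Char :=
  let rots := (PySem.List.pyRange 0 (s.length : Int) 1).map (fun i =>
    PySem.List.slice s (some i) none ++ PySem.List.slice s none (some i))
  match PySem.List.min? rots (fun r => r) with
  | some m => m
  | none => s

def solution_alt (a : List Int) : Int :=
  (a.foldl (fun (st : PySem.Dict (List Char) Int × Int) x =>
    let k := canonRot (PySem.Int.toChars x)
    let c := st.1.getD k 0
    (st.1.insert k (c + 1), st.2 + c)) (PySem.Dict.empty, 0)).2

-- ===== PRECONDITION & SPEC =====
def Spec_solution (a : List Int) (out : Int) : Prop := out = solution_alt a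
instance (a : List Int) (out : Int) : Decidable (Spec_solution a out) := by unfold Spec_solution; infer_instance

-- ===== CLAIM (what is proved, stated in full; the proofs are below) =====
def Claim_equal_solution : Prop := ∀ (a : List Int), Dom_solution a → Spec_solution a (solution a)

-- ===== LEMMAS AND PROOFS =====


-- B's key
def pvKey (x : Int) : List Char := canonRot (PySem.Int.toChars x)

-- the list of rotations built inside canonRot
def rotList (s : List Char) : List (List Char) :=
  (PySem.List.pyRange 0 (s.length : Int) 1).map (fun i =>
    PySem.List.slice s (some i) none ++ PySem.List.slice s none (some i))

lemma rotList_eq (s : List Char) :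
    rotList s = (List.range s.length).map (fun k => s.drop k ++ s.take k) := by
  unfold rotList
  rw [PySem.List.pyRange_one]
  simp [List.map_map, Function.comp_def, PySem.List.slice_from_natCast, PySem.List.slice_to_natCast]

lemma mem_rotList_iff (s : List Char) (hs : s ≠ []) (x : List Char) :
    x ∈ rotList s ↔ x ~r s := by
  rw [rotList_eq]
  simp only [List.mem_map, List.mem_range]
  constructor
  · rintro ⟨k, hk, rfl⟩
    exact (List.IsRotated.symm ⟨k, List.rotate_eq_drop_append_take hk.le⟩)
  · intro hx
    obtain ⟨k, hk, hrot⟩ := List.isRotated_iff_mod.mp hx.symm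
    rcases Nat.lt_or_ge k s.length with h | h
    · exact ⟨k, h, by rw [← List.rotate_eq_drop_append_take h.le, hrot]⟩
    · have hk' : k = s.length := le_antisymm hk h
      refine ⟨0, by simpa using List.length_pos_of_ne_nil hs, ?_⟩
      subst hk'
      rw [List.rotate_length] at hrot
      simp [hrot]

lemma canonRot_eq_of_min? {s : List Char} {m : List Char}
    (h : PySem.List.min? (rotList s) (fun r => r) = some m) : canonRot s = m := by
  have h0 : canonRot s = match PySem.List.min? (rotList s) (fun r => r) with
    | some m => m | none => s := rfl
  rw [h0, h]

lemma rotList_ne_nil {s : List Char} (hs : s ≠ []) : rotList s ≠ [] := by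
  rw [rotList_eq]
  simp [List.range_eq_nil, hs]

lemma canonRot_min {s : List Char} (hs : s ≠ []) :
    ∃ m, PySem.List.min? (rotList s) (fun r => r) = some m ∧ canonRot s = m := by
  rcases h : PySem.List.min? (rotList s) (fun r => r) with _ | m
  · exact absurd ((PySem.List.min?_eq_none_iff _ _).mp h) (rotList_ne_nil hs)
  · exact ⟨m, rfl, canonRot_eq_of_min? h⟩

lemma canonRot_nil : canonRot [] = [] := rfl

lemma canonRot_isRotated (s : List Char) : canonRot s ~r s := by
  rcases eq_or_ne s [] with rfl | hs
  · rw [canonRot_nil]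
  · obtain ⟨m, hm, he⟩ := canonRot_min hs
    rw [he]
    exact (mem_rotList_iff s hs m).mp (PySem.List.min?_mem hm)

lemma core_lt_iff_lt (x y : List Char) : @LT.lt (List Char) List.instLT x y ↔ x < y := by
  rw [show @LT.lt (List Char) List.instLT x y ↔ List.lt x y from Iff.rfl, List.lt_iff_lex_lt]

lemma minFold_spec {α : Type} (key : α → List Char) :
    ∀ (xs : List α) (acc : Option α) (m : α),
      xs.foldl (fun acc x =>
        match acc with
        | none => some x
        | some m => if key x < key m then some x else some m) acc = some m →
      (∀ y ∈ xs, ¬ @LT.lt (List Char) List.instLT (key y) (key m)) ∧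
        (∀ a, acc = some a → ¬ @LT.lt (List Char) List.instLT (key a) (key m)) := by
  intro xs
  induction xs with
  | nil =>
    intro acc m h
    simp only [List.foldl_nil] at h
    refine ⟨by simp, ?_⟩
    rintro a rfl2
    rw [h] at rfl2
    cases rfl2
    rw [core_lt_iff_lt]
    exact lt_irrefl _
  | cons x t ih =>
    intro acc m h
    simp only [List.foldl_cons] at h
    obtain ⟨H1, H2⟩ := ih _ m h
    have hx : ¬ @LT.lt (List Char) List.instLT (key x) (key m) := by
      cases acc with
      | none => exact H2 x rfl
      | some m0 =>
        by_cases hc : key x < key m0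
        · simp only [if_pos hc] at H2
          exact H2 x rfl
        · simp only [if_neg hc] at H2
          have h1 : ¬ key m0 < key m := by
            rw [← core_lt_iff_lt]; exact H2 m0 rfl
          rw [core_lt_iff_lt]
          rw [not_lt] at hc h1 ⊢
          exact h1.trans hc
    refine ⟨?_, ?_⟩
    · intro y hy
      rcases hy with _ | hy
      · exact hx
      · exact H1 y (by assumption)
    · intro a ha
      cases acc with
      | none => cases ha
      | some m0 =>
        injection ha with ha
        subst ha
        by_cases hc : key x < key m0
        · simp only [if_pos hc] at H2
          have h1 : ¬ key x < key m := by rw [← core_lt_iff_lt]; exact H2 x rfl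
          rw [core_lt_iff_lt]
          rw [not_lt] at h1 ⊢
          exact h1.trans hc.le
        · simp only [if_neg hc] at H2
          exact H2 m0 rfl

lemma min?_isMin' {α : Type} {xs : List α} {key : α → List Char} {m : α}
    (h : PySem.List.min? xs key = some m) : ∀ y ∈ xs, key m ≤ key y := by
  intro y hy
  have h2 := (minFold_spec key xs none m h).1 y hy
  rw [core_lt_iff_lt, not_lt] at h2
  exact h2

lemma canonRot_eq_of_isRotated {s t : List Char} (h : s ~r t) : canonRot s = canonRot t := by
  rcases eq_or_ne s [] with rfl | hs
  · have : t = [] := List.length_eq_zero_iff.mp (by simpa using h.perm.length_eq.symm)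
    rw [this]
  · have ht : t ≠ [] := by
      intro h0; subst h0
      exact hs (List.length_eq_zero_iff.mp (by simpa using h.perm.length_eq))
    obtain ⟨m, hm, he⟩ := canonRot_min hs
    obtain ⟨m', hm', he'⟩ := canonRot_min ht
    rw [he, he']
    have h1 : m ∈ rotList t := (mem_rotList_iff t ht m).mpr
      (((mem_rotList_iff s hs m).mp (PySem.List.min?_mem hm)).trans h)
    have h2 : m' ∈ rotList s := (mem_rotList_iff s hs m').mpr
      (((mem_rotList_iff t ht m').mp (PySem.List.min?_mem hm')).trans h.symm)
    have ha : m ≤ m' := min?_isMin' hm m' h2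
    have hb : m' ≤ m := min?_isMin' hm' m h1
    exact le_antisymm ha hb

lemma infix_doubled_of_isRotated {s t : List Char} (h : s ~r t) : s <:+: t ++ t := by
  obtain ⟨k, hk, hrot⟩ := List.isRotated_iff_mod.mp h.symm
  refine ⟨t.take k, t.drop k, ?_⟩
  rw [← hrot, List.rotate_eq_drop_append_take hk]
  calc t.take k ++ (t.drop k ++ t.take k) ++ t.drop k
      = (t.take k ++ t.drop k) ++ (t.take k ++ t.drop k) := by
        simp only [List.append_assoc]
    _ = t ++ t := by rw [List.take_append_drop]

lemma isRotated_of_infix_doubled {s t : List Char} (hl : s.length = t.length)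
    (h : s <:+: t ++ t) : s ~r t := by
  obtain ⟨pre, suf, heq⟩ := h
  have hk : pre.length ≤ t.length := by
    have := congrArg List.length heq
    simp [hl] at this
    omega
  have hs : s = t.drop pre.length ++ t.take pre.length := by
    have h1 : (pre ++ (s ++ suf)).drop pre.length = s ++ suf := List.drop_left
    have h2 : (t ++ t).drop pre.length = t.drop pre.length ++ t := by
      rw [List.drop_append]
      congr 1
      rw [show pre.length - t.length = 0 from by omega, List.drop_zero]
    rw [List.append_assoc] at heq
    rw [heq] at h1
    have h3 : (s ++ suf).take s.length = s := List.take_left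
    rw [← h1, h2] at h3
    rw [← h3, hl, List.take_append]
    rw [List.take_of_length_le (by simp)]
    congr 2
    simp
    omega
  exact (List.IsRotated.symm ⟨pre.length, (List.rotate_eq_drop_append_take hk).trans hs.symm⟩)


lemma pvTest_iff (s t : List Char) :
    (s.length = t.length ∧ PySem.Chars.isIn s (t ++ t) = true) ↔ canonRot s = canonRot t := by
  constructor
  · rintro ⟨hl, hin⟩
    exact canonRot_eq_of_isRotated
      (isRotated_of_infix_doubled hl ((PySem.Chars.isIn_iff_infix _ _).mp hin))
  · intro h
    have hrot : s ~r t :=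
      ((canonRot_isRotated s).symm.trans (h ▸ canonRot_isRotated t))
    exact ⟨hrot.perm.length_eq, (PySem.Chars.isIn_iff_infix _ _).mpr (infix_doubled_of_isRotated hrot)⟩

lemma pvTest_int_iff (x y : Int) :
    ((PySem.Int.toChars x).length = (PySem.Int.toChars y).length ∧
      PySem.Chars.isIn (PySem.Int.toChars x) (PySem.Int.toChars y ++ PySem.Int.toChars y) = true)
    ↔ pvKey x = pvKey y := pvTest_iff _ _

-- reference pair count
def refCount : List Int → Int
  | [] => 0
  | x :: t => ((t.countP (fun y => decide (pvKey y = pvKey x))) : Int) + refCount t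

-- collapse A's two nested ifs into one
lemma ite_ite_and (p q : Prop) [Decidable p] [Decidable q] (c : Int) :
    (if p then (if q then c + 1 else c) else c) = if p ∧ q then c + 1 else c := by
  split_ifs <;> tauto

def sumForm (a : List Int) : Int :=
  ((List.range a.length).map (fun k =>
    (((a.drop (k + 1)).countP (fun y =>
      decide (((PySem.Int.toChars (PySem.List.pyGetD a (k : Int) 0)).length = (PySem.Int.toChars y).length ∧ PySem.Chars.isIn (PySem.Int.toChars (PySem.List.pyGetD a (k : Int) 0)) ((PySem.Int.toChars y) ++ (PySem.Int.toChars y)) = true)))) : Int))).sum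

lemma solution_eq_sumForm (a : List Int) : solution a = sumForm a := by
  unfold solution
  have hinner : ∀ (c : Int) (i : Int), i ∈ PySem.List.pyRange 0 (a.length : Int) 1 →
      (PySem.List.pyRange (i + 1) (a.length : Int) 1).foldl (fun count j =>
        if (PySem.Int.toChars (PySem.List.pyGetD a i 0)).length
            = (PySem.Int.toChars (PySem.List.pyGetD a j 0)).length then
          if PySem.Chars.isIn (PySem.Int.toChars (PySem.List.pyGetD a i 0))
              (PySem.Int.toChars (PySem.List.pyGetD a j 0) ++ PySem.Int.toChars (PySem.List.pyGetD a j 0)) = true then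
            count + 1
          else count
        else count) c
      = c + (((a.drop (i + 1).toNat).countP (fun y =>
          decide (((PySem.Int.toChars (PySem.List.pyGetD a i 0)).length = (PySem.Int.toChars y).length ∧ PySem.Chars.isIn (PySem.Int.toChars (PySem.List.pyGetD a i 0)) ((PySem.Int.toChars y) ++ (PySem.Int.toChars y)) = true)))) : Int) := by
    intro c i hi
    have hb : (fun (count : Int) (j : Int) =>
        if (PySem.Int.toChars (PySem.List.pyGetD a i 0)).length
            = (PySem.Int.toChars (PySem.List.pyGetD a j 0)).length then
          if PySem.Chars.isIn (PySem.Int.toChars (PySem.List.pyGetD a i 0))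
              (PySem.Int.toChars (PySem.List.pyGetD a j 0) ++ PySem.Int.toChars (PySem.List.pyGetD a j 0)) = true then
            count + 1
          else count
        else count)
        = (fun (count : Int) (j : Int) =>
            (fun (c : Int) (y : Int) => if ((PySem.Int.toChars (PySem.List.pyGetD a i 0)).length = (PySem.Int.toChars y).length ∧ PySem.Chars.isIn (PySem.Int.toChars (PySem.List.pyGetD a i 0)) ((PySem.Int.toChars y) ++ (PySem.Int.toChars y)) = true)
              then c + 1 else c) count (PySem.List.pyGetD a j 0)) := by
      funext c j
      exact ite_ite_and _ _ _
    rw [hb]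
    have h0i : (0 : Int) ≤ i + 1 := by
      have := (PySem.List.mem_pyRange_one).mp hi
      omega
    rw [PySem.List.foldl_pyRange_pyGetD' a 0
      (fun (c : Int) (y : Int) => if ((PySem.Int.toChars (PySem.List.pyGetD a i 0)).length = (PySem.Int.toChars y).length ∧ PySem.Chars.isIn (PySem.Int.toChars (PySem.List.pyGetD a i 0)) ((PySem.Int.toChars y) ++ (PySem.Int.toChars y)) = true)
        then c + 1 else c) c h0i]
    rw [PySem.List.foldl_ite_add_one]
  refine (PySem.List.foldl_congr_mem
    (PySem.List.pyRange 0 (a.length : Int) 1)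
    (f := fun (count : Int) (i : Int) =>
      (PySem.List.pyRange (i + 1) (a.length : Int) 1).foldl (fun count j =>
        if (PySem.Int.toChars (PySem.List.pyGetD a i 0)).length
            = (PySem.Int.toChars (PySem.List.pyGetD a j 0)).length then
          if PySem.Chars.isIn (PySem.Int.toChars (PySem.List.pyGetD a i 0))
              (PySem.Int.toChars (PySem.List.pyGetD a j 0) ++ PySem.Int.toChars (PySem.List.pyGetD a j 0)) = true then
            count + 1
          else count
        else count) count)
    (g := fun (c : Int) (i : Int) =>
      c + (((a.drop (i + 1).toNat).countP (fun y =>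
        decide (((PySem.Int.toChars (PySem.List.pyGetD a i 0)).length = (PySem.Int.toChars y).length ∧ PySem.Chars.isIn (PySem.Int.toChars (PySem.List.pyGetD a i 0)) ((PySem.Int.toChars y) ++ (PySem.Int.toChars y)) = true)))) : Int))
    (init := (0 : Int))
    (fun c i hi => hinner c i hi)).trans ?_
  rw [PySem.List.foldl_add]
  rw [PySem.List.pyRange_one, List.map_map]
  simp only [Int.sub_zero, Int.toNat_natCast, zero_add]
  unfold sumForm
  congr 1

lemma sumForm_eq_refCount (a : List Int) : sumForm a = refCount a := by
  induction a with
  | nil => rfl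
  | cons x t ih =>
    unfold sumForm at *
    rw [show (x :: t).length = t.length + 1 from rfl, List.range_succ_eq_map]
    simp only [List.map_cons, List.map_map, List.sum_cons]
    have h0 : PySem.List.pyGetD (x :: t) ((0 : Nat) : Int) 0 = x := by
      simp only [PySem.List.pyGetD_natCast, List.getD_cons_zero]
    have hmap : ∀ k ∈ List.range t.length,
        ((fun k : Nat =>
          ((((x :: t).drop (k + 1)).countP (fun y =>
            decide (((PySem.Int.toChars (PySem.List.pyGetD (x :: t) (k : Int) 0)).length = (PySem.Int.toChars y).length ∧ PySem.Chars.isIn (PySem.Int.toChars (PySem.List.pyGetD (x :: t) (k : Int) 0)) ((PySem.Int.toChars y) ++ (PySem.Int.toChars y)) = true)))) : Int)) ∘ Nat.succ) k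
        = (fun k : Nat =>
          (((t.drop (k + 1)).countP (fun y =>
            decide (((PySem.Int.toChars (PySem.List.pyGetD t (k : Int) 0)).length = (PySem.Int.toChars y).length ∧ PySem.Chars.isIn (PySem.Int.toChars (PySem.List.pyGetD t (k : Int) 0)) ((PySem.Int.toChars y) ++ (PySem.Int.toChars y)) = true)))) : Int)) k := by
      intro k hk
      rw [List.mem_range] at hk
      simp only [Function.comp]
      rw [show ((k.succ : Nat) : Int) = ((k + 1 : Nat) : Int) from rfl]
      simp only [PySem.List.pyGetD_natCast, List.getD_cons_succ, List.drop_succ_cons]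
    rw [List.map_congr_left hmap, ih]
    simp only [h0, List.drop_succ_cons, List.drop_zero, refCount]
    congr 1
    norm_cast
    refine List.countP_congr fun y _ => ?_
    simp only [decide_eq_true_eq]
    rw [pvTest_int_iff]
    exact eq_comm

lemma solution_eq_refCount (a : List Int) : solution a = refCount a :=
  (solution_eq_sumForm a).trans (sumForm_eq_refCount a)

lemma refCount_append (l : List Int) (x : Int) :
    refCount (l ++ [x]) = refCount l + ((l.countP (fun y => decide (pvKey y = pvKey x))) : Int) := by
  induction l with
  | nil => simp [refCount]
  | cons z l ih =>
    simp only [List.cons_append, refCount, ih, List.countP_append, List.countP_cons]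
    by_cases h : pvKey z = pvKey x
    · have h' : pvKey x = pvKey z := h.symm
      rw [if_pos (decide_eq_true h), if_pos (decide_eq_true h')]
      simp only [List.countP_nil]
      push_cast
      ring
    · have h' : pvKey x ≠ pvKey z := fun hh => h hh.symm
      rw [if_neg (by simpa using h'), if_neg (by simpa using h)]
      simp only [List.countP_nil]
      push_cast
      ring

def stepB : PySem.Dict (List Char) Int × Int → Int → PySem.Dict (List Char) Int × Int :=
  fun st x => (st.1.insert (pvKey x) (st.1.getD (pvKey x) 0 + 1), st.2 + st.1.getD (pvKey x) 0)

lemma solution_alt_eq_fold (a : List Int) :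
    solution_alt a = (a.foldl stepB (PySem.Dict.empty, 0)).2 := rfl

lemma fold_fst (l : List Int) :
    ∀ (d : PySem.Dict (List Char) Int) (c : Int),
      (l.foldl stepB (d, c)).1 = (l.map pvKey).foldl (fun d k => d.insert k (d.getD k 0 + 1)) d := by
  induction l with
  | nil => intro d c; rfl
  | cons x t ih => intro d c; simp only [List.foldl_cons, List.map_cons, stepB]; exact ih _ _

lemma solution_alt_eq_refCount (a : List Int) : solution_alt a = refCount a := by
  induction a using List.reverseRecOn with
  | nil => rfl
  | append_singleton l x ih =>
    rw [solution_alt_eq_fold, List.foldl_append, refCount_append, ← ih, solution_alt_eq_fold]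
    simp only [List.foldl_cons, List.foldl_nil, stepB]
    have hfst : (l.foldl stepB (PySem.Dict.empty, 0)).1.getD (pvKey x) 0
        = ((l.map pvKey).count (pvKey x) : Int) := by
      rw [fold_fst]
      rw [PySem.Dict.foldl_insert_getD_add_one_eq_counter, PySem.Dict.getD_counter]
    rw [hfst]
    congr 1
    rw [List.count_eq_countP, List.countP_map]
    norm_cast
    refine List.countP_congr fun y _ => ?_
    simp [Function.comp]


-- ===== VERDICT (by name: the statement is the Claim_ definition above) =====
theorem solution_spec : Claim_equal_solution := by
  intro a _
  unfold Spec_solution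
  rw [solution_eq_refCount, solution_alt_eq_refCount]
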